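-- pv_equiv track=rewrite | github.com/jugoprex/sherlock | sherlock/analisis.py | generar_dict_filt
-- ===== SOURCE A (Python) =====
-- import operator
--
-- def generar_dict_filt(palabras_separadas, palabras_filtro, n):
--     for i in palabras_filtro:
--         try:
--             while True:
--                 palabras_separadas.remove(i)
--         except:
--             pass
--
--     contador = []
--     for i in palabras_separadas:
--         contador.append(palabras_separadas.count(i))
--
--     #aca armo el diccionario
--     my_dict = {}
--     for i in range (len(palabras_separadas)):
--         my_dict[palabras_separadas[i]] = contador[i]
--
--     #ordeno el dic
--     my_dict = dict(sorted(my_dict.items(), key=operator.itemgetter(1),reverse = True))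
--
--     #me quedo con las primeras n
--     dict_n = {}
--     cont = 0
--     if n > 0:
--         for i,j in my_dict.items():
--             dict_n[i] = j
--             cont += 1
--             if cont == n:
--                 break
--         return dict_n
--     else:
--         return my_dict
-- ===== SOURCE B (Python) =====
-- def generar_dict_filt(palabras_separadas, palabras_filtro, n):
--     # bucket (counting) sort by frequency instead of comparison sort; mutates
--     # palabras_separadas in place exactly like the original
--     filtro = set(palabras_filtro)
--     palabras_separadas[:] = [w for w in palabras_separadas if w not in filtro]
--
--     counts = {}
--     for w in palabras_separadas:
--         counts[w] = counts.get(w, 0) + 1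
--
--     buckets = {}
--     for w, c in counts.items():
--         buckets.setdefault(c, []).append(w)
--
--     result = {}
--     if counts:
--         for c in range(max(buckets), 0, -1):
--             for w in buckets.get(c, []):
--                 result[w] = c
--
--     if n > 0:
--         return dict(list(result.items())[:n])
--     return result
-- ===== Notes on version B (the rewrite author's own statement) =====
-- stated objective: faster
-- what changed: Replaces A's repeated list.remove() filtering, per-element list.count() (quadratic) and comparison sort of the (word,count) pairs by a single set-based filter pass, a one-pass counting dict, and a bucket/counting sort that emits words per count value from the maximum down, preserving first-occurrence order within equal counts.
import Mathlib
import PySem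

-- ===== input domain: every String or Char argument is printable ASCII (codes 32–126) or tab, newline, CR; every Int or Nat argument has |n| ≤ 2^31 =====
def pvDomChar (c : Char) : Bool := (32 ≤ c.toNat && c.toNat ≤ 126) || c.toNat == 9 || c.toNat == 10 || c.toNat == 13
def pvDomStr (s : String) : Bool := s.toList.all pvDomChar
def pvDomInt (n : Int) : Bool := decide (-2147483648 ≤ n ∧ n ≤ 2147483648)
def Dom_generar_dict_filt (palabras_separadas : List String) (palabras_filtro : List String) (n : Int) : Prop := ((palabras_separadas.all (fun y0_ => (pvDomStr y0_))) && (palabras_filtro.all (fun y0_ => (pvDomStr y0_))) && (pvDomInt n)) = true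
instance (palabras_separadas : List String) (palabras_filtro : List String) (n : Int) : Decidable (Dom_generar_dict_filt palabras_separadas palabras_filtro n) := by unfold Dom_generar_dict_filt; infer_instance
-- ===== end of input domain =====

-- B replaces A's quadratic remove/count passes and comparison sort by one filter pass, a
-- counting dict and a bucket (counting) sort by frequency; equivalence is about the return
-- value (both Pythons also mutate palabras_separadas to the same filtered list).

-- ===== PORT A =====

-- 'while True: palabras_separadas.remove(i)' until ValueError
def pvRemoveAll (xs : List String) (x : String) : List String :=
  match h : PySem.List.remove? xs x with
  | some ys => pvRemoveAll ys x
  | none => xs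
termination_by xs.length
decreasing_by
  have hx : x ∈ xs := by
    by_contra hc
    rw [(PySem.List.remove?_eq_none_iff xs x).mpr hc] at h
    simp at h
  have hlen : ys.length = xs.length - 1 := by
    rw [PySem.List.remove?_eq_some_erase xs x hx] at h
    cases h
    exact List.length_erase_of_mem hx
  have hpos : 0 < xs.length := List.length_pos_of_mem hx
  omega

-- the 'for ... dict_n[i] = j ... if cont == n: break' loop
def pvTakeLoop (n : Int) : List (String × Int) → Int → PySem.Dict String Int → PySem.Dict String Int
  | [], _, acc => acc
  | (i, j) :: rest, cont, acc =>
    if cont + 1 == n then acc.insert i j else pvTakeLoop n rest (cont + 1) (acc.insert i j)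

def generar_dict_filt (palabras_separadas : List String) (palabras_filtro : List String) (n : Int) : List (String × Int) :=
  let ps := palabras_filtro.foldl (fun acc i => pvRemoveAll acc i) palabras_separadas
  let contador := ps.foldl (fun acc i => acc ++ [((PySem.List.count ps i : Nat) : Int)]) ([] : List Int)
  let my_dict := (PySem.List.pyRange 0 (PySem.List.len ps)).foldl
      (fun d i => d.insert (PySem.List.pyGetD ps i "") (PySem.List.pyGetD contador i 0))
      (PySem.Dict.empty : PySem.Dict String Int)
  let sorted_items := PySem.List.sorted my_dict.items (fun p => p.2) true
  let my_dict2 := sorted_items.foldl (fun d p => d.insert p.1 p.2) (PySem.Dict.empty : PySem.Dict String Int)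
  if n > 0 then (pvTakeLoop n my_dict2.items 0 PySem.Dict.empty).items
  else my_dict2.items

-- ===== PORT B =====

def generar_dict_filt_alt (palabras_separadas : List String) (palabras_filtro : List String) (n : Int) : List (String × Int) :=
  let filtro := PySem.Set.ofList palabras_filtro
  let ps := palabras_separadas.filter (fun w => !(PySem.Set.contains filtro w))
  let counts := ps.foldl (fun d w => d.insert w (d.getD w 0 + 1)) (PySem.Dict.empty : PySem.Dict String Int)
  let buckets := counts.items.foldl (fun b p => b.modify p.2 [] (fun l => l ++ [p.1]))
      (PySem.Dict.empty : PySem.Dict Int (List String))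
  let result :=
    if counts.items.isEmpty then (PySem.Dict.empty : PySem.Dict String Int)
    else
      match PySem.List.max? buckets.keys (fun c => c) with
      | none => PySem.Dict.empty
      | some m =>
        (PySem.List.pyRange m 0 (-1)).foldl
          (fun r c => (buckets.getD c []).foldl (fun r w => r.insert w c) r)
          (PySem.Dict.empty : PySem.Dict String Int)
  if n > 0 then PySem.List.slice result.items none (some n) else result.items

-- ===== PRECONDITION & SPEC =====
def Spec_generar_dict_filt (palabras_separadas : List String) (palabras_filtro : List String) (n : Int) (out : List (String × Int)) : Prop := out = generar_dict_filt_alt palabras_separadas palabras_filtro n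
instance (palabras_separadas : List String) (palabras_filtro : List String) (n : Int) (out : List (String × Int)) : Decidable (Spec_generar_dict_filt palabras_separadas palabras_filtro n out) := by unfold Spec_generar_dict_filt; infer_instance

-- ===== CLAIM (what is proved, stated in full; the proofs are below) =====
def Claim_equal_generar_dict_filt : Prop := ∀ (palabras_separadas : List String) (palabras_filtro : List String) (n : Int), Dom_generar_dict_filt palabras_separadas palabras_filtro n → Spec_generar_dict_filt palabras_separadas palabras_filtro n (generar_dict_filt palabras_separadas palabras_filtro n)

-- ===== LEMMAS AND PROOFS =====

lemma pvFilter_erase (x : String) : ∀ xs : List String,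
    (xs.erase x).filter (fun y => !(y == x)) = xs.filter (fun y => !(y == x)) := by
  intro xs
  induction xs with
  | nil => rfl
  | cons y t ih =>
    rw [List.erase_cons]
    by_cases hy : y = x
    · subst hy; simp
    · have hb : (y == x) = false := by simp [hy]
      simp [hb, ih]

lemma pvRemoveAll_eq_filter (xs : List String) (x : String) :
    pvRemoveAll xs x = xs.filter (fun y => !(y == x)) := by
  induction xs using pvRemoveAll.induct (x := x) with
  | case1 xs ys h ih =>
    have hx : x ∈ xs := by
      by_contra hc
      rw [(PySem.List.remove?_eq_none_iff xs x).mpr hc] at h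
      simp at h
    have hys : ys = xs.erase x := by
      rw [PySem.List.remove?_eq_some_erase xs x hx] at h
      exact (Option.some_inj.mp h).symm
    rw [pvRemoveAll]
    split
    next ys' heq =>
      rw [h] at heq
      cases heq
      rw [ih, hys, pvFilter_erase]
    next heq =>
      rw [h] at heq
      simp at heq
  | case2 xs h =>
    have hx : x ∉ xs := (PySem.List.remove?_eq_none_iff xs x).mp h
    rw [pvRemoveAll]
    split
    next ys' heq =>
      rw [h] at heq
      simp at heq
    next heq =>
      exact (List.filter_eq_self.mpr (fun y hy => by
        have : y ≠ x := fun he => hx (he ▸ hy)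
        simp [this])).symm

lemma pvFoldl_removeAll (palabras_filtro : List String) : ∀ ps : List String,
    palabras_filtro.foldl (fun acc i => pvRemoveAll acc i) ps
      = ps.filter (fun w => !(PySem.Set.contains (PySem.Set.ofList palabras_filtro) w)) := by
  induction palabras_filtro with
  | nil =>
    intro ps
    simp [PySem.Set.ofList_nil, PySem.Set.contains]
  | cons i pf ih =>
    intro ps
    rw [List.foldl_cons, ih, pvRemoveAll_eq_filter, List.filter_filter]
    apply List.filter_congr
    intro w _
    by_cases h1 : w = i <;> by_cases h2 : w ∈ pf <;>
      simp [PySem.Set.contains, PySem.Set.mem_ofList, h1, h2]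

lemma pvGet?_foldl_insert {κ ν : Type} [BEq κ] [LawfulBEq κ] (g : κ → ν) :
    ∀ (l : List κ) (d : PySem.Dict κ ν) (k : κ),
    (l.foldl (fun d x => d.insert x (g x)) d).get? k = if k ∈ l then some (g k) else d.get? k := by
  intro l
  induction l with
  | nil => intro d k; simp
  | cons x t ih =>
    intro d k
    rw [List.foldl_cons, ih]
    by_cases hm : k ∈ t
    · simp [hm]
    · by_cases hk : k = x
      · subst hk; simp [hm, PySem.Dict.get?_insert_self]
      · simp [hm, hk, PySem.Dict.get?_insert_of_ne _ _ hk]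

lemma pvInsertCount_eq_counter (l : List String) :
    l.foldl (fun d w => d.insert w ((PySem.List.count l w : Nat) : Int)) PySem.Dict.empty
      = PySem.Dict.counter l := by
  apply PySem.Dict.ext
  have hkeys : (l.foldl (fun d w => d.insert w ((PySem.List.count l w : Nat) : Int)) PySem.Dict.empty).keys
      = PySem.Set.ofList l := by
    rw [PySem.Dict.keys_foldl_insert l (fun _ w => ((PySem.List.count l w : Nat) : Int)) PySem.Dict.empty]
    rfl
  have hnd : (l.foldl (fun d w => d.insert w ((PySem.List.count l w : Nat) : Int)) PySem.Dict.empty).keys.Nodup :=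
    PySem.Dict.nodup_keys_foldl_insert l _ _ PySem.Dict.nodup_keys_empty
  rw [PySem.Dict.items_eq_map_keys _ hnd 0, PySem.Dict.items_counter, hkeys]
  apply List.map_congr_left
  intro k hk
  have hkl : k ∈ l := (PySem.Set.mem_ofList l k).mp hk
  have hget := pvGet?_foldl_insert (fun w => ((PySem.List.count l w : Nat) : Int)) l PySem.Dict.empty k
  rw [if_pos hkl] at hget
  have hgd : (l.foldl (fun d w => d.insert w ((PySem.List.count l w : Nat) : Int)) PySem.Dict.empty).getD k 0
      = ((PySem.List.count l k : Nat) : Int) := by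
    simp only [PySem.Dict.getD, hget]
    rfl
  rw [hgd]
  rfl

lemma pvInsertBy_append {α : Type} (before : α → α → Bool) (x : α) :
    ∀ (ys zs : List α), (∀ y ∈ ys, before x y = false) →
    PySem.List.insertBy before x (ys ++ zs) = ys ++ PySem.List.insertBy before x zs := by
  intro ys
  induction ys with
  | nil => intro zs _; rfl
  | cons y t ih =>
    intro zs h
    have hy : before x y = false := h y (by simp)
    cases t with
    | nil =>
      simp only [List.cons_append, List.nil_append, PySem.List.insertBy, hy]
      simp
    | cons a b =>
      simp only [List.cons_append, PySem.List.insertBy, hy]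
      simp only [Bool.false_eq_true, if_false, List.cons.injEq, true_and]
      have := ih zs (fun y hy => h y (by simp [hy]))
      simpa [PySem.List.insertBy] using this

lemma pvInsertBy_front {α : Type} (before : α → α → Bool) (x : α) (ys : List α)
    (h : ∀ y ∈ ys, before x y = true) :
    PySem.List.insertBy before x ys = x :: ys := by
  cases ys with
  | nil => rfl
  | cons y t =>
    have hy : before x y = true := h y (by simp)
    simp [PySem.List.insertBy, hy]

lemma pvInsertBy_flatMap {α : Type} (key : α → Int) (x : α) :
    ∀ (cs : List Int) (l : List α), cs.Pairwise (· > ·) → key x ∈ cs →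
    PySem.List.insertBy (fun a b => decide (key b < key a)) x
        (cs.flatMap (fun c => l.filter (fun p => key p == c)))
      = cs.flatMap (fun c => (l ++ [x]).filter (fun p => key p == c)) := by
  intro cs
  induction cs with
  | nil => intro l _ hx; simp at hx
  | cons c cs' ih =>
    intro l hcs hx
    obtain ⟨hgt, hcs'⟩ := List.pairwise_cons.mp hcs
    rw [List.flatMap_cons, List.flatMap_cons]
    by_cases h1 : key x = c
    · have hfc : ∀ y ∈ l.filter (fun p => key p == c),
          (fun a b => decide (key b < key a)) x y = false := by
        intro y hy
        have := (List.mem_filter.mp hy).2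
        have hyc : key y = c := by simpa using this
        simp [hyc, h1]
      rw [pvInsertBy_append _ _ _ _ hfc]
      have hfront : ∀ y ∈ cs'.flatMap (fun c => l.filter (fun p => key p == c)),
          (fun a b => decide (key b < key a)) x y = true := by
        intro y hy
        obtain ⟨c', hc', hyf⟩ := List.mem_flatMap.mp hy
        have hyc : key y = c' := by simpa using (List.mem_filter.mp hyf).2
        have : c' < c := hgt c' hc'
        simp [hyc, h1]
        omega
      rw [pvInsertBy_front _ _ _ hfront]
      have hxc : (key x == c) = true := by simp [h1]
      have htail : cs'.flatMap (fun c => (l ++ [x]).filter (fun p => key p == c))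
          = cs'.flatMap (fun c => l.filter (fun p => key p == c)) := by
        apply List.flatMap_congr
        intro c' hc'
        have : (key x == c') = false := by
          have : c' < c := hgt c' hc'
          simp; omega
        simp [List.filter_append, this]
      rw [htail, List.filter_append, List.filter_cons, hxc]
      simp
    · have hx' : key x ∈ cs' := by
        rcases List.mem_cons.mp hx with h | h
        · exact absurd h h1
        · exact h
      have hxlt : key x < c := hgt _ hx'
      have hfc : ∀ y ∈ l.filter (fun p => key p == c),
          (fun a b => decide (key b < key a)) x y = false := by
        intro y hy
        have hyc : key y = c := by simpa using (List.mem_filter.mp hy).2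
        simp [hyc]
        omega
      rw [pvInsertBy_append _ _ _ _ hfc, ih l hcs' hx']
      have hxc : (key x == c) = false := by simp; omega
      rw [List.filter_append, List.filter_cons, hxc]
      simp

lemma pvSorted_eq_flatMap {α : Type} (key : α → Int) (l : List α) (cs : List Int)
    (hcs : cs.Pairwise (· > ·)) (hmem : ∀ p ∈ l, key p ∈ cs) :
    PySem.List.sorted l key true = cs.flatMap (fun c => l.filter (fun p => key p == c)) := by
  rw [PySem.List.sorted_rev_eq_foldl_insertBy]
  revert hmem
  induction l using List.reverseRecOn with
  | nil => intro _; simp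
  | append_singleton t x ih =>
    intro hmem
    rw [List.foldl_append, List.foldl_cons, List.foldl_nil]
    rw [ih (fun p hp => hmem p (List.mem_append_left _ hp))]
    exact pvInsertBy_flatMap key x cs t hcs (hmem x (by simp))

lemma pvTakeLoop_items (n : Int) : ∀ (l : List (String × Int)) (cont : Int) (acc : PySem.Dict String Int),
    (l.map Prod.fst).Nodup → (∀ p ∈ l, acc.contains p.1 = false) → cont < n →
    (pvTakeLoop n l cont acc).items = acc.items ++ l.take (n - cont).toNat := by
  intro l
  induction l with
  | nil => intro cont acc _ _ _; simp [pvTakeLoop]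
  | cons p rest ih =>
    obtain ⟨i, j⟩ := p
    intro cont acc hnd hfr hlt
    have hfi : acc.contains i = false := hfr (i, j) (by simp)
    rw [pvTakeLoop]
    by_cases hb : cont + 1 = n
    · rw [if_pos (by simpa using hb)]
      rw [PySem.Dict.items_insert_of_not_contains _ _ hfi]
      have h1 : (n - cont).toNat = 1 := by omega
      rw [h1]
      simp
    · rw [if_neg (by simpa using hb)]
      rw [List.map_cons] at hnd
      have hnd' : (rest.map Prod.fst).Nodup := (List.nodup_cons.mp hnd).2
      have hni : i ∉ rest.map Prod.fst := (List.nodup_cons.mp hnd).1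
      have hfr' : ∀ q ∈ rest, (acc.insert i j).contains q.1 = false := by
        intro q hq
        rw [PySem.Dict.contains_insert]
        have hqi : (q.1 == i) = false := by
          have : q.1 ≠ i := by
            intro he
            exact hni (he ▸ List.mem_map_of_mem hq)
          simp [this]
        rw [hqi, hfr q (List.mem_cons_of_mem _ hq)]
        rfl
      rw [ih (cont + 1) (acc.insert i j) hnd' hfr' (by omega)]
      rw [PySem.Dict.items_insert_of_not_contains _ _ hfi]
      have h1 : (n - cont).toNat = (n - (cont + 1)).toNat + 1 := by omega
      rw [h1, List.take_succ_cons, List.append_assoc]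
      rfl

lemma pvFoldlFoldl (cs : List Int) (g : Int → List String) (d : PySem.Dict String Int) :
    cs.foldl (fun r c => (g c).foldl (fun r w => r.insert w c) r) d
      = (cs.flatMap (fun c => (g c).map (fun w => (w, c)))).foldl (fun r p => r.insert p.1 p.2) d := by
  induction cs generalizing d with
  | nil => rfl
  | cons c cs' ih =>
    rw [List.foldl_cons, ih, List.flatMap_cons, List.foldl_append, List.foldl_map]

lemma pvRangeDesc_pairwise (m : Int) : (PySem.List.pyRange m 0 (-1)).Pairwise (· > ·) := by
  rw [PySem.List.pyRange_of_neg _ _ (by norm_num : (-1 : Int) < 0)]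
  apply List.pairwise_map.mpr
  apply List.Pairwise.imp _ List.pairwise_lt_range
  intro a b h
  show m + (-1) * (a : Int) > m + (-1) * (b : Int)
  omega

lemma pvMapFst_filter_id (l : List (String × Int)) (c : Int) :
    ((l.filter (fun p => p.2 == c)).map (fun p => (p.1, c))) = l.filter (fun p => p.2 == c) := by
  conv_rhs => rw [← List.map_id (l.filter (fun p => p.2 == c))]
  apply List.map_congr_left
  intro p hp
  have : p.2 = c := by simpa using (List.mem_filter.mp hp).2
  cases p
  simp_all

lemma pvSnodup (l : List String) :
    ((PySem.List.sorted (PySem.Dict.counter l).items (fun p => p.2) true).map Prod.fst).Nodup := by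
  have hperm : (PySem.List.sorted (PySem.Dict.counter l).items (fun p => p.2) true).Perm
      (PySem.Dict.counter l).items := PySem.List.sorted_perm _ _ _
  apply (hperm.map Prod.fst).nodup_iff.mpr
  have := PySem.Dict.nodup_keys_counter l
  simpa [PySem.Dict.keys] using this

lemma pvDictOfSorted_items (l : List String) :
    ((PySem.List.sorted (PySem.Dict.counter l).items (fun p => p.2) true).foldl
        (fun d p => d.insert p.1 p.2) PySem.Dict.empty).items
      = PySem.List.sorted (PySem.Dict.counter l).items (fun p => p.2) true := by
  have h := PySem.Dict.items_foldl_insert_fresh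
      (PySem.List.sorted (PySem.Dict.counter l).items (fun p => p.2) true)
      (fun p => p.1) (fun p => p.2) PySem.Dict.empty
      (fun a _ => PySem.Dict.contains_empty _) (pvSnodup l)
  simpa using h

lemma pvA_eq (ps0 pf : List String) (n : Int) :
    generar_dict_filt ps0 pf n =
      (if n > 0 then
        (PySem.List.sorted
          (PySem.Dict.counter (ps0.filter (fun w => !(PySem.Set.contains (PySem.Set.ofList pf) w)))).items
          (fun p => p.2) true).take n.toNat
      else
        PySem.List.sorted
          (PySem.Dict.counter (ps0.filter (fun w => !(PySem.Set.contains (PySem.Set.ofList pf) w)))).items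
          (fun p => p.2) true) := by
  simp only [generar_dict_filt]
  rw [pvFoldl_removeAll]
  set l := ps0.filter (fun w => !(PySem.Set.contains (PySem.Set.ofList pf) w)) with hl
  rw [PySem.List.foldl_append_singleton_eq_map (fun i => ((PySem.List.count l i : Nat) : Int))]
  rw [List.nil_append]
  have hcongr : (PySem.List.pyRange 0 (PySem.List.len l)).foldl
      (fun d i => d.insert (PySem.List.pyGetD l i "")
        (PySem.List.pyGetD (l.map (fun i => ((PySem.List.count l i : Nat) : Int))) i 0))
      (PySem.Dict.empty : PySem.Dict String Int)
      = (PySem.List.pyRange 0 (PySem.List.len l)).foldl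
      (fun d i => d.insert (PySem.List.pyGetD l i "")
        ((PySem.List.count l (PySem.List.pyGetD l i "") : Nat) : Int))
      (PySem.Dict.empty : PySem.Dict String Int) := by
    apply PySem.List.foldl_congr_mem
    intro acc i hi
    obtain ⟨h0, h1⟩ := PySem.List.mem_pyRange_one.mp hi
    have h1' : i < (l.length : Int) := by simpa [PySem.List.len] using h1
    have h1m : i < ((l.map (fun i => ((PySem.List.count l i : Nat) : Int))).length : Int) := by
      simpa [List.length_map] using h1'
    rw [PySem.List.pyGetD_eq_getElem l "" h0 h1',
        PySem.List.pyGetD_eq_getElem _ 0 h0 h1m]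
    rw [List.getElem_map]
  rw [hcongr]
  rw [PySem.List.foldl_pyRange_pyGetD l "" (fun d w => d.insert w ((PySem.List.count l w : Nat) : Int))
      (PySem.Dict.empty : PySem.Dict String Int) (le_refl 0)]
  rw [Int.toNat_zero, List.drop_zero]
  rw [pvInsertCount_eq_counter]
  split_ifs with hn
  · rw [pvDictOfSorted_items l]
    rw [pvTakeLoop_items n _ 0 PySem.Dict.empty (pvSnodup l)
        (fun p _ => PySem.Dict.contains_empty _) hn]
    simp [PySem.Dict.empty]
  · exact pvDictOfSorted_items l

lemma pvB_eq (ps0 pf : List String) (n : Int) :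
    generar_dict_filt_alt ps0 pf n =
      (if n > 0 then
        (PySem.List.sorted
          (PySem.Dict.counter (ps0.filter (fun w => !(PySem.Set.contains (PySem.Set.ofList pf) w)))).items
          (fun p => p.2) true).take n.toNat
      else
        PySem.List.sorted
          (PySem.Dict.counter (ps0.filter (fun w => !(PySem.Set.contains (PySem.Set.ofList pf) w)))).items
          (fun p => p.2) true) := by
  simp only [generar_dict_filt_alt]
  rw [PySem.Dict.foldl_insert_getD_add_one_eq_counter]
  set l := ps0.filter (fun w => !(PySem.Set.contains (PySem.Set.ofList pf) w)) with hl
  set I := (PySem.Dict.counter l).items with hI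
  set S := PySem.List.sorted I (fun p => p.2) true with hS
  by_cases hI0 : I = []
  · have hS0 : S = [] := by
      rw [hS, hI0]
      rfl
    rw [hI0, hS0]
    simp only [List.isEmpty_nil, if_true]
    have he : (PySem.Dict.empty : PySem.Dict String Int).items = [] := rfl
    rw [he]
    split_ifs with hn
    · rw [PySem.List.slice_to _ (le_of_lt hn)]
    · rfl
  · have hiE : I.isEmpty = false := by
      simpa [List.isEmpty_iff] using hI0
    rw [hiE]
    simp only [Bool.false_eq_true, if_false]
    set B := I.foldl (fun b p => b.modify p.2 [] (fun l => l ++ [p.1]))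
        (PySem.Dict.empty : PySem.Dict Int (List String)) with hB
    have hBgetD : ∀ c, B.getD c [] = (I.filter (fun p => p.2 == c)).map (fun p => p.1) := by
      intro c
      have h1 : B = (I.map Prod.swap).foldl (fun b q => b.modify q.1 [] (fun ws => ws ++ [q.2]))
          PySem.Dict.empty := by
        rw [List.foldl_map]
        rfl
      rw [h1, PySem.Dict.getD_foldl_modify_append]
      simp [List.filter_map, List.map_map, Function.comp_def]
    have hBkeys : B.keys = PySem.Set.update PySem.Set.empty (I.map (fun p => p.2)) := by
      rw [hB, PySem.Dict.keys_foldl_modify_key I (fun p => p.2) [] (fun _ p ws => ws ++ [p.1])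
          PySem.Dict.empty]
      rfl
    obtain ⟨p0, hp0⟩ := List.exists_mem_of_ne_nil I hI0
    have hp0k : p0.2 ∈ B.keys := by
      rw [hBkeys]
      exact (PySem.Set.mem_update _ _ _).mpr (Or.inr (List.mem_map_of_mem hp0))
    cases hm : PySem.List.max? B.keys (fun c => c) with
    | none =>
      exfalso
      rw [PySem.List.max?_eq_none_iff] at hm
      rw [hm] at hp0k
      simp at hp0k
    | some m =>
      dsimp only
      rw [pvFoldlFoldl]
      have hLS : ((PySem.List.pyRange m 0 (-1)).flatMap
          (fun c => (B.getD c []).map (fun w => (w, c)))) = S := by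
        have h2 : ∀ c ∈ PySem.List.pyRange m 0 (-1),
            (B.getD c []).map (fun w => (w, c)) = I.filter (fun p => p.2 == c) := by
          intro c _
          rw [hBgetD c, List.map_map]
          have hcemp : ((fun w => (w, c)) ∘ fun (p : String × Int) => p.1)
              = fun (p : String × Int) => (p.1, c) := rfl
          rw [hcemp, pvMapFst_filter_id]
        rw [List.flatMap_congr h2, hS]
        symm
        apply pvSorted_eq_flatMap (fun p => p.2) I _ (pvRangeDesc_pairwise m)
        intro p hp
        rw [PySem.List.mem_pyRange_neg_one]
        constructor
        · have hp' := hp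
          rw [hI, PySem.Dict.items_counter] at hp'
          obtain ⟨k, hk, rfl⟩ := List.mem_map.mp hp'
          have hkl : k ∈ l := (PySem.Set.mem_ofList l k).mp hk
          have : 0 < List.count k l := List.count_pos_iff.mpr hkl
          simpa using this
        · have hpk : p.2 ∈ B.keys := by
            rw [hBkeys]
            exact (PySem.Set.mem_update _ _ _).mpr (Or.inr (List.mem_map_of_mem hp))
          exact PySem.List.max?_isMax hm p.2 hpk
      rw [hLS, hS]
      rw [pvDictOfSorted_items l]
      split_ifs with hn
      · rw [PySem.List.slice_to _ (le_of_lt hn)]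
      · rfl

lemma pvMain (ps0 pf : List String) (n : Int) :
    generar_dict_filt ps0 pf n = generar_dict_filt_alt ps0 pf n := by
  rw [pvA_eq, pvB_eq]



-- ===== VERDICT (by name: the statement is the Claim_ definition above) =====
theorem generar_dict_filt_spec : Claim_equal_generar_dict_filt := by
  intro ps pf n _
  unfold Spec_generar_dict_filt
  exact pvMain ps pf n
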